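-- pv_equiv track=rewrite | github.com/manoti3/bank-transactions-codility | transactions.py | solution
-- ===== SOURCE A (Python) =====
-- def solution(A, D):
--     # Dictionary to track total transactions for each month
--     transactions = {}
--     # Variables to track total income and expenses
--     total_income = 0
--     total_expenses = 0
--
--     # Iterate through each transaction
--     for amount, date in zip(A, D):
--         # Extract year, month, and day from the date
--         year, month, _ = date.split('-')
--         # Create a key in the transactions dictionary based on year and month
--         key = f"{year}-{month}"
--
--         # Update total amount for the corresponding month in transactions
--         if key not in transactions:
--             transactions[key] = 0
--         transactions[key] += amount
--
--         # Update total income and expenses based on the sign of the amount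
--         if amount >= 0:
--             total_income += amount
--         else:
--             total_expenses += amount
--
--     # Calculate fees based on specific transaction amounts
--     total_fee = 0
--     for amount in transactions.values():
--         # Adjust fee calculation based on the specified rules
--         if amount < -100:
--             total_fee += 5
--         elif amount < -50:
--             total_fee += 4
--         elif amount < -25:
--             total_fee += 3
--         elif amount < -10:
--             total_fee += 2
--         elif amount < 0:
--             total_fee += 1
--
--     # Calculate final balance by subtracting total fees from the sum of total income and total expenses
--     final_balance = total_income + total_expenses - total_fee
--     return final_balance
-- ===== SOURCE B (Python) =====
-- def _fee(m):
--     if m < -100: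
--         return 5
--     if m < -50:
--         return 4
--     if m < -25:
--         return 3
--     if m < -10:
--         return 2
--     if m < 0:
--         return 1
--     return 0
--
--
-- def solution(A, D):
--     # Pair each amount with its "year-month" key once.
--     keyed = []
--     for amount, date in zip(A, D):
--         parts = date.split('-')
--         keyed.append((parts[0] + '-' + parts[1], amount))
--     # Distinct months in first-occurrence order.
--     months = []
--     for k, _ in keyed:
--         if k not in months:
--             months.append(k)
--     # Fee per month from that month's total, by a per-key scan.
--     total_fee = sum(_fee(sum(a for k2, a in keyed if k2 == k)) for k in months)
--     return sum(a for _, a in keyed) - total_fee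
-- ===== Notes on version B (the rewrite author's own statement) =====
-- stated objective: alternative
-- what changed: Replaces A's one-pass dict accumulation with income/expense accumulators by building a (month-key, amount) list once, collecting the distinct months in order, and computing each month's total by a per-month summing scan; the balance is the plain sum of the zipped amounts minus the fees.
import Mathlib
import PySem

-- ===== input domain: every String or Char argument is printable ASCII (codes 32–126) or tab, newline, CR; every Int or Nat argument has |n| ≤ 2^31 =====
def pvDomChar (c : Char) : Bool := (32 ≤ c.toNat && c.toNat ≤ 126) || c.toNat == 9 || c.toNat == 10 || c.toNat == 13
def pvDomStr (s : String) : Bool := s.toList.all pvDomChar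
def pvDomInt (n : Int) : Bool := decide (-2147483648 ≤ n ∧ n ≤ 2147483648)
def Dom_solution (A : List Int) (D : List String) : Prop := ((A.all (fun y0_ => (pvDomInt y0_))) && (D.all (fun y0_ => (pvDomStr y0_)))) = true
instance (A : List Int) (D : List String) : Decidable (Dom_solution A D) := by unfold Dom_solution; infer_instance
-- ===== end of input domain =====

-- B replaces A's one-pass dict accumulation by a keyed list, an ordered list of distinct
-- months and a per-month summing scan (objective: alternative decomposition, not faster).

-- ===== PORT A =====
-- the elif chain of A's second loop, accumulating into total_fee
def feeAccA (f : Int) (v : Int) : Int :=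
  if v < -100 then f + 5
  else if v < -50 then f + 4
  else if v < -25 then f + 3
  else if v < -10 then f + 2
  else if v < 0 then f + 1
  else f

-- body of A's first loop (dict update + income/expense split)
def stepA (st : PySem.Dict String Int × Int × Int) (p : Int × String) :
    PySem.Dict String Int × Int × Int :=
  match PySem.Str.split? p.2 "-" with
  | some [y, m, _] =>
    let key := y ++ "-" ++ m
    let d0 := if st.1.contains key then st.1 else st.1.insert key 0
    let d1 := d0.insert key (d0.getD key 0 + p.1)
    (d1, (if p.1 ≥ 0 then st.2.1 + p.1 else st.2.1),
         (if p.1 ≥ 0 then st.2.2 else st.2.2 + p.1))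
  | _ => st
  -- fallthrough: Python raises ValueError (unpacking a split of ≠ 3 parts) — excluded by
  -- Pre_solution; the 'none' case of split? is unreachable (separator "-" is nonempty)

def solution (A : List Int) (D : List String) : Int :=
  let st := (A.zip D).foldl stepA (PySem.Dict.empty, 0, 0)
  let total_fee := st.1.values.foldl feeAccA 0
  st.2.1 + st.2.2 - total_fee

-- ===== PORT B =====
def feeB (m : Int) : Int :=
  if m < -100 then 5
  else if m < -50 then 4
  else if m < -25 then 3
  else if m < -10 then 2
  else if m < 0 then 1
  else 0

-- parts[0] + '-' + parts[1] of date.split('-')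
def keyB (s : String) : String :=
  match PySem.Str.split? s "-" with
  | some (p0 :: p1 :: _) => p0 ++ "-" ++ p1
  | _ => ""
  -- fallthrough: Python raises IndexError (fewer than 2 parts) — outside Pre_solution

def solution_alt (A : List Int) (D : List String) : Int :=
  let keyed := (A.zip D).map (fun p => (keyB p.2, p.1))
  let months := keyed.foldl (fun ms p => if p.1 ∈ ms then ms else ms ++ [p.1]) []
  let total_fee := (months.map (fun k =>
      feeB (((keyed.filter (fun q => q.1 == k)).map (·.2)).sum))).sum
  (keyed.map (·.2)).sum - total_fee

-- ===== PRECONDITION & SPEC =====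
-- Pre_ excludes exactly the inputs on which A raises ValueError: a zipped date whose
-- split('-') does not have exactly 3 parts.
def Pre_solution (A : List Int) (D : List String) : Prop :=
  ∀ p ∈ A.zip D, ((PySem.Str.split? p.2 "-").getD []).length = 3

instance (A : List Int) (D : List String) : Decidable (Pre_solution A D) := by
  unfold Pre_solution; infer_instance

def pvWitness_solution : List Int × List String :=
  ([5, -30, -40], ["2020-01-05", "2020-01-20", "2020-02-01"])

def Spec_solution (A : List Int) (D : List String) (out : Int) : Prop := out = solution_alt A D
instance (A : List Int) (D : List String) (out : Int) : Decidable (Spec_solution A D out) := by unfold Spec_solution; infer_instance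

-- ===== CLAIM (what is proved, stated in full; the proofs are below) =====
def Claim_equal_solution : Prop := ∀ (A : List Int) (D : List String), Dom_solution A D → Pre_solution A D → Spec_solution A D (solution A D)


-- ===== LEMMAS AND PROOFS =====

-- the dict step A actually performs, as a single insert
theorem dict_two_step (d : PySem.Dict String Int) (k : String) (a : Int) :
    (if d.contains k then d else d.insert k 0).insert k
      ((if d.contains k then d else d.insert k 0).getD k 0 + a) =
    d.insert k (d.getD k 0 + a) := by
  by_cases hc : d.contains k
  · simp [hc]
  · simp only [hc, Bool.false_eq_true, if_false]
    rw [PySem.Dict.getD_insert_self, PySem.Dict.insert_insert_self]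
    have h0 : d.getD k 0 = 0 :=
      PySem.Dict.getD_of_not_contains d 0 (by simpa using hc)
    rw [h0]

-- split? with separator "-" never returns none
theorem split_dash_isSome (s : String) : ∃ l, PySem.Str.split? s "-" = some l :=
  ⟨_, rfl⟩

-- under Pre_'s 3-part condition, stepA is a single keyed insert plus the sign split
theorem stepA_eq (st : PySem.Dict String Int × Int × Int) (p : Int × String)
    (h : ((PySem.Str.split? p.2 "-").getD []).length = 3) :
    stepA st p =
      (st.1.insert (keyB p.2) (st.1.getD (keyB p.2) 0 + p.1),
       (if p.1 ≥ 0 then st.2.1 + p.1 else st.2.1),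
       (if p.1 ≥ 0 then st.2.2 else st.2.2 + p.1)) := by
  obtain ⟨l, hl⟩ := split_dash_isSome p.2
  rw [hl] at h
  simp only [Option.getD_some] at h
  match l, h with
  | [y, m, z], _ =>
    simp only [stepA, keyB, hl]
    rw [dict_two_step]

-- the dict component of A's fold
theorem foldA_dict (l : List (Int × String))
    (h : ∀ p ∈ l, ((PySem.Str.split? p.2 "-").getD []).length = 3)
    (st : PySem.Dict String Int × Int × Int) :
    (l.foldl stepA st).1 =
      (l.map (fun p => (keyB p.2, p.1))).foldl
        (fun d q => d.insert q.1 (d.getD q.1 0 + q.2)) st.1 := by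
  induction l generalizing st with
  | nil => rfl
  | cons p t ih =>
    simp only [List.foldl_cons, List.map_cons]
    rw [stepA_eq st p (h p (List.mem_cons_self ..))]
    exact ih (fun q hq => h q (List.mem_cons_of_mem _ hq)) _

-- income + expenses of A's fold is the plain sum of the zipped amounts
theorem foldA_sum (l : List (Int × String))
    (h : ∀ p ∈ l, ((PySem.Str.split? p.2 "-").getD []).length = 3)
    (st : PySem.Dict String Int × Int × Int) :
    (l.foldl stepA st).2.1 + (l.foldl stepA st).2.2 =
      st.2.1 + st.2.2 + (l.map (·.1)).sum := by
  induction l generalizing st with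
  | nil => simp
  | cons p t ih =>
    simp only [List.foldl_cons, List.map_cons, List.sum_cons]
    rw [stepA_eq st p (h p (List.mem_cons_self ..))]
    rw [ih (fun q hq => h q (List.mem_cons_of_mem _ hq))]
    by_cases hp : p.1 ≥ 0 <;> simp [hp] <;> ring

-- lookup in the grouped-sum dict fold
theorem dfold_getD (kl : List (String × Int)) (d : PySem.Dict String Int) (k : String) :
    (kl.foldl (fun d q => d.insert q.1 (d.getD q.1 0 + q.2)) d).getD k 0 =
      d.getD k 0 + ((kl.filter (fun q => q.1 == k)).map (·.2)).sum := by
  induction kl generalizing d with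
  | nil => simp
  | cons q t ih =>
    simp only [List.foldl_cons, List.filter_cons]
    rw [ih]
    by_cases hq : q.1 = k
    · subst hq
      simp [PySem.Dict.getD_insert_self]
      ring
    · have hk : ¬ k = q.1 := fun h => hq h.symm
      rw [PySem.Dict.getD_insert, if_neg hk]
      simp [hq]

-- B's months loop builds ordered distinct keys (PySem.Set.update)
theorem months_eq (kl : List (String × Int)) (s : List String) :
    kl.foldl (fun ms p => if p.1 ∈ ms then ms else ms ++ [p.1]) s =
      PySem.Set.update s (kl.map (·.1)) := by
  induction kl generalizing s with
  | nil => rfl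
  | cons q t ih =>
    have hupd : PySem.Set.update s (q.1 :: t.map (·.1)) =
        PySem.Set.update (PySem.Set.add s q.1) (t.map (·.1)) := rfl
    rw [List.map_cons, List.foldl_cons, hupd, ih]
    congr 1
    by_cases hq : q.1 ∈ s <;>
      simp [PySem.Set.add, PySem.Set.contains, hq, List.contains_eq_mem]

-- A's fee loop is the sum of feeB over the values
theorem feeAcc_eq (vs : List Int) (f : Int) :
    vs.foldl feeAccA f = f + (vs.map feeB).sum := by
  induction vs generalizing f with
  | nil => simp
  | cons v t ih =>
    simp only [List.foldl_cons, List.map_cons, List.sum_cons]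
    rw [ih]
    have : feeAccA f v = f + feeB v := by
      unfold feeAccA feeB; split_ifs <;> ring
    rw [this]; ring

-- ===== VERDICT (by name: the statement is the Claim_ definition above) =====
theorem solution_spec : Claim_equal_solution := by
  intro A D _ hpre
  unfold Spec_solution
  unfold solution solution_alt
  simp only
  set l := A.zip D with hl
  set kl := l.map (fun p => (keyB p.2, p.1)) with hkl
  have hd := foldA_dict l hpre (PySem.Dict.empty, 0, 0)
  have hs := foldA_sum l hpre (PySem.Dict.empty, 0, 0)
  rw [hd, hs]
  -- keys of the dict fold
  have hkeys : (kl.foldl (fun d q => d.insert q.1 (d.getD q.1 0 + q.2))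
      PySem.Dict.empty).keys = PySem.Set.ofList (kl.map (·.1)) := by
    rw [PySem.Dict.keys_foldl_insert_key]
    simp [PySem.Dict.keys_empty, PySem.Set.update, PySem.Set.ofList_eq_foldl]
  have hnodup : (kl.foldl (fun d q => d.insert q.1 (d.getD q.1 0 + q.2))
      PySem.Dict.empty).keys.Nodup := by
    apply PySem.Dict.nodup_keys_foldl_insert_key
    exact PySem.Dict.nodup_keys_empty
  have hvals : (kl.foldl (fun d q => d.insert q.1 (d.getD q.1 0 + q.2))
      PySem.Dict.empty).values =
      (PySem.Set.ofList (kl.map (·.1))).map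
        (fun k => ((kl.filter (fun q => q.1 == k)).map (·.2)).sum) := by
    rw [PySem.Dict.values_eq_map_keys _ hnodup 0, hkeys]
    apply List.map_congr_left
    intro k _
    rw [dfold_getD]
    simp
  have hsum2 : (kl.map (·.2)).sum = (l.map (·.1)).sum := by
    rw [hkl, List.map_map]; rfl
  rw [feeAcc_eq, hvals, months_eq, List.map_map, hsum2]
  have hofl : PySem.Set.update ([] : List String) (kl.map (·.1)) =
      PySem.Set.ofList (kl.map (·.1)) := by
    rw [PySem.Set.ofList_eq_foldl]; rfl
  rw [hofl]
  simp only [Function.comp_def, zero_add]
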